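-- pv_equiv track=rewrite | github.com/pypi-data/pypi-mirror-319 | packages/KSSDS/kssds-1.0.1.tar.gz/kssds-1.0.1/src/KSSDS/inference.py | handle_repetitions
-- ===== SOURCE A (Python) =====
-- def handle_repetitions(decoded_preds, max_repeats=60, detection_threshold=70):
--     words = decoded_preds.split()
--     if len(words) <= detection_threshold:
--         return [decoded_preds]
--
--     result_sentences = []
--     current_sentence = []
--     current_repetition = []
--
--     def flush_repetition():
--         if len(current_repetition) > max_repeats:
--             for j in range(0, len(current_repetition), max_repeats):
--                 result_sentences.append(" ".join(current_repetition[j:j + max_repeats]))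
--         else:
--             current_sentence.extend(current_repetition)
--
--     for i, word in enumerate(words):
--         if i > 0 and word == words[i - 1]:
--             if current_sentence:
--                 last_word = current_sentence.pop()
--                 if current_sentence:
--                     result_sentences.append(" ".join(current_sentence))
--                 current_sentence = []
--                 current_repetition.append(last_word)
--             current_repetition.append(word)
--         else:
--             if current_repetition:
--                 flush_repetition()
--                 current_repetition = []
--             current_sentence.append(word)
--
--     if current_repetition:
--         flush_repetition()
--
--     if current_sentence:
--         result_sentences.append(" ".join(current_sentence))
--
--     return result_sentences
-- ===== SOURCE B (Python) =====
-- from itertools import groupby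
--
--
-- def handle_repetitions(decoded_preds, max_repeats=60, detection_threshold=70):
--     words = decoded_preds.split()
--     if len(words) <= detection_threshold:
--         return [decoded_preds]
--
--     result_sentences = []
--     current_sentence = []
--     for word, grp in groupby(words):
--         count = len(list(grp))
--         if count == 1:
--             current_sentence.append(word)
--         else:
--             if current_sentence:
--                 result_sentences.append(" ".join(current_sentence))
--                 current_sentence = []
--             if count > max_repeats:
--                 for j in range(0, count, max_repeats):
--                     result_sentences.append(" ".join([word] * min(max_repeats, count - j)))
--             else:
--                 current_sentence = [word] * count
--
--     if current_sentence:
--         result_sentences.append(" ".join(current_sentence))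
--
--     return result_sentences
-- ===== Notes on version B (the rewrite author's own statement) =====
-- stated objective: simpler
-- what changed: B groups the words into maximal runs of equal words (itertools.groupby) and handles one (word, count) run per step, replacing A's per-word index-lookback with pop-last-word and a lazily flushed repetition buffer.
import Mathlib
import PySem

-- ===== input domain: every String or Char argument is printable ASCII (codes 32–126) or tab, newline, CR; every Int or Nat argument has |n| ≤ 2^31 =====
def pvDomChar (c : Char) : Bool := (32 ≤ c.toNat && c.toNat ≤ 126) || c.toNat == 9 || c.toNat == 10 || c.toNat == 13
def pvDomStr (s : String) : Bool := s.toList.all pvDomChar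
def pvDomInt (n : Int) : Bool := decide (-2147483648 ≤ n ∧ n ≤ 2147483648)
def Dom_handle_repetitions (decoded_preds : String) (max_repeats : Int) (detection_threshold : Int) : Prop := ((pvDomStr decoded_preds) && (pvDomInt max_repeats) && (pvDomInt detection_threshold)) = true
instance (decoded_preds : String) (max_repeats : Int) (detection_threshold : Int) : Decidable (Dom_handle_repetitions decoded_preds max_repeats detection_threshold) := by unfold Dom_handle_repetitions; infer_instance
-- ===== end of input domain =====

-- B replaces A's index-lookback / pop-last-word / lazy repetition buffer with a single
-- groupby-style pass over maximal runs of equal words (objective: simpler).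

-- ===== PORT A =====
-- flush_repetition(): chunks a long repetition into result_sentences, or extends current_sentence
def hrFlush (max_repeats : Int) (rs cs rep : List String) : List String × List String :=
  if (rep.length : Int) > max_repeats then
    ((PySem.List.pyRange 0 (rep.length : Int) max_repeats).foldl
      (fun acc j => acc ++ [PySem.Str.join " " (PySem.List.slice rep (some j) (some (j + max_repeats)))]) rs,
     cs)
  else (rs, cs ++ rep)

-- one iteration of A's `for i, word in enumerate(words)` loop; state = (result_sentences, current_sentence, current_repetition).
-- the Python guard `if current_sentence:` followed by `current_sentence.pop()` is rendered as a match on pop? (none ↔ empty list)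
def hrStep (words : List String) (max_repeats : Int)
    (st : List String × List String × List String) (iw : Int × String) :
    List String × List String × List String :=
  if iw.1 > 0 ∧ PySem.List.pyGet? words (iw.1 - 1) = some iw.2 then
    match PySem.List.pop? st.2.1 with
    | some lw =>
        if lw.2 ≠ [] then (st.1 ++ [PySem.Str.join " " lw.2], [], (st.2.2 ++ [lw.1]) ++ [iw.2])
        else (st.1, [], (st.2.2 ++ [lw.1]) ++ [iw.2])
    | none => (st.1, st.2.1, st.2.2 ++ [iw.2])
  else
    if st.2.2 ≠ [] then
      let rc := hrFlush max_repeats st.1 st.2.1 st.2.2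
      (rc.1, rc.2 ++ [iw.2], [])
    else (st.1, st.2.1 ++ [iw.2], [])

def handle_repetitions (decoded_preds : String) (max_repeats : Int) (detection_threshold : Int) : List String :=
  let words := PySem.Str.split₀ decoded_preds
  if (words.length : Int) ≤ detection_threshold then [decoded_preds]
  else
    let st := (PySem.List.enumerate words 0).foldl (hrStep words max_repeats) ([], [], [])
    let rc := if st.2.2 ≠ [] then hrFlush max_repeats st.1 st.2.1 st.2.2 else (st.1, st.2.1)
    if rc.2 ≠ [] then rc.1 ++ [PySem.Str.join " " rc.2] else rc.1

-- ===== PORT B =====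
-- itertools.groupby over words: the list of (word, run length) for maximal runs of equal words
def hrGroupsAux (w : String) (c : Nat) : List String → List (String × Nat)
  | [] => [(w, c)]
  | x :: xs => if x = w then hrGroupsAux w (c + 1) xs else (w, c) :: hrGroupsAux x 1 xs

def hrGroups : List String → List (String × Nat)
  | [] => []
  | w :: ws => hrGroupsAux w 1 ws

-- one iteration of B's loop over (word, count) groups; state = (result_sentences, current_sentence)
def hrStepB (max_repeats : Int) (st : List String × List String) (g : String × Nat) :
    List String × List String :=
  if g.2 = 1 then (st.1, st.2 ++ [g.1])
  else
    let p := if st.2 ≠ [] then (st.1 ++ [PySem.Str.join " " st.2], ([] : List String)) else (st.1, st.2)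
    if (g.2 : Int) > max_repeats then
      ((PySem.List.pyRange 0 (g.2 : Int) max_repeats).foldl
        (fun acc j => acc ++ [PySem.Str.join " " (PySem.List.pyRepeat [g.1] (min max_repeats ((g.2 : Int) - j)))]) p.1,
       p.2)
    else (p.1, PySem.List.pyRepeat [g.1] (g.2 : Int))

def handle_repetitions_alt (decoded_preds : String) (max_repeats : Int) (detection_threshold : Int) : List String :=
  let words := PySem.Str.split₀ decoded_preds
  if (words.length : Int) ≤ detection_threshold then [decoded_preds]
  else
    let b := (hrGroups words).foldl (hrStepB max_repeats) ([], [])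
    if b.2 ≠ [] then b.1 ++ [PySem.Str.join " " b.2] else b.1

-- ===== PRECONDITION & SPEC =====
-- Pre_ excludes exactly the inputs where Python A raises (ValueError from range(0, n, 0)):
-- more words than detection_threshold, max_repeats = 0, and some adjacent pair of equal words.
def Pre_handle_repetitions (decoded_preds : String) (max_repeats : Int) (detection_threshold : Int) : Prop :=
  ¬ (((PySem.Str.split₀ decoded_preds).length : Int) > detection_threshold ∧ max_repeats = 0 ∧
     ((PySem.Str.split₀ decoded_preds).zip (PySem.Str.split₀ decoded_preds).tail).any (fun p => p.1 == p.2) = true)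
instance (decoded_preds : String) (max_repeats : Int) (detection_threshold : Int) : Decidable (Pre_handle_repetitions decoded_preds max_repeats detection_threshold) := by unfold Pre_handle_repetitions; infer_instance

def pvWitness_handle_repetitions : String × Int × Int := ("a a a b", 2, 1)

def Spec_handle_repetitions (decoded_preds : String) (max_repeats : Int) (detection_threshold : Int) (out : List String) : Prop := out = handle_repetitions_alt decoded_preds max_repeats detection_threshold
instance (decoded_preds : String) (max_repeats : Int) (detection_threshold : Int) (out : List String) : Decidable (Spec_handle_repetitions decoded_preds max_repeats detection_threshold out) := by unfold Spec_handle_repetitions; infer_instance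

-- ===== CLAIM (what is proved, stated in full; the proofs are below) =====
def Claim_equal_handle_repetitions : Prop := ∀ (decoded_preds : String) (max_repeats : Int) (detection_threshold : Int), Dom_handle_repetitions decoded_preds max_repeats detection_threshold → Pre_handle_repetitions decoded_preds max_repeats detection_threshold → Spec_handle_repetitions decoded_preds max_repeats detection_threshold (handle_repetitions decoded_preds max_repeats detection_threshold)

-- ===== LEMMAS AND PROOFS =====

-- A's loop with the index-lookback replaced by the tracked previous word (proved equal in hrStep_eq_stepP)
def stepP (max_repeats : Int) (p : Option String)
    (st : List String × List String × List String) (w : String) :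
    List String × List String × List String :=
  if p = some w then
    match PySem.List.pop? st.2.1 with
    | some lw =>
        if lw.2 ≠ [] then (st.1 ++ [PySem.Str.join " " lw.2], [], (st.2.2 ++ [lw.1]) ++ [w])
        else (st.1, [], (st.2.2 ++ [lw.1]) ++ [w])
    | none => (st.1, st.2.1, st.2.2 ++ [w])
  else
    if st.2.2 ≠ [] then
      let rc := hrFlush max_repeats st.1 st.2.1 st.2.2
      (rc.1, rc.2 ++ [w], [])
    else (st.1, st.2.1 ++ [w], [])

def prevFold (max_repeats : Int) :
    Option String → (List String × List String × List String) → List String →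
    (List String × List String × List String)
  | _, s, [] => s
  | p, s, w :: ws => prevFold max_repeats (some w) (stepP max_repeats p s w) ws

def hrFlushIf (cs : List String) : List String := if cs ≠ [] then [PySem.Str.join " " cs] else []

-- A's state in the middle of a run: c copies of w seen so far, entered from B-state (rs, cs)
def Astate (rs cs : List String) (w : String) (c : Nat) :
    List String × List String × List String :=
  if c = 1 then (rs, cs ++ [w], []) else (rs ++ hrFlushIf cs, [], List.replicate c w)

def flushA (max_repeats : Int) (s : List String × List String × List String) :
    List String × List String :=
  if s.2.2 ≠ [] then hrFlush max_repeats s.1 s.2.1 s.2.2 else (s.1, s.2.1)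

def finalB (b : List String × List String) : List String :=
  if b.2 ≠ [] then b.1 ++ [PySem.Str.join " " b.2] else b.1

theorem pyRange_zero_nonpos (c : Nat) (mr : Int) (h : mr ≤ 0) :
    PySem.List.pyRange 0 (c : Int) mr = [] := by
  simp only [PySem.List.pyRange]
  split_ifs with h1 h2 h3 <;> first | rfl | omega

theorem chunks_eq (mr : Int) (c : Nat) (w : String) (init : List String) :
    (PySem.List.pyRange 0 (c : Int) mr).foldl
      (fun acc j => acc ++ [PySem.Str.join " " (PySem.List.slice (List.replicate c w) (some j) (some (j + mr)))]) init
    = (PySem.List.pyRange 0 (c : Int) mr).foldl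
      (fun acc j => acc ++ [PySem.Str.join " " (PySem.List.pyRepeat [w] (min mr ((c : Int) - j)))]) init := by
  by_cases hmr : mr ≤ 0
  · rw [pyRange_zero_nonpos c mr hmr]
    simp
  · replace hmr : 0 < mr := by omega
    apply PySem.List.foldl_congr_mem
    intro acc j hj
    rw [PySem.List.mem_pyRange_iff_of_pos hmr] at hj
    obtain ⟨hj0, hjc, -⟩ := hj
    rw [PySem.List.slice_toNat _ hj0 (by omega), PySem.List.pyRepeat_singleton,
      List.drop_replicate, List.take_replicate]
    have hmin : min ((j + mr).toNat - j.toNat) (c - j.toNat) = (min mr ((c : Int) - j)).toNat := by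
      omega
    rw [hmin]

theorem flushA_Astate (mr : Int) (rs cs : List String) (w : String) (c : Nat) (hc : 1 ≤ c) :
    flushA mr (Astate rs cs w c) = hrStepB mr (rs, cs) (w, c) := by
  by_cases h1 : c = 1
  · subst h1
    simp [Astate, flushA, hrStepB]
  · have hrep : List.replicate c w ≠ [] := by
      simp only [ne_eq, List.replicate_eq_nil_iff]
      omega
    simp only [Astate, if_neg h1, flushA, if_pos hrep, hrStepB, hrFlush, List.length_replicate]
    have hp : (if cs ≠ [] then (rs ++ [PySem.Str.join " " cs], ([] : List String)) else (rs, cs))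
        = (rs ++ hrFlushIf cs, ([] : List String)) := by
      by_cases hcs : cs = [] <;> simp [hrFlushIf, hcs]
    rw [hp]
    by_cases hgt : (c : Int) > mr
    · simp only [if_pos hgt, if_neg h1]
      rw [chunks_eq]
    · simp only [if_neg hgt, if_neg h1]
      simp [PySem.List.pyRepeat_singleton]

theorem stepP_rep (mr : Int) (rs cs : List String) (w : String) (c : Nat) (hc : 1 ≤ c) :
    stepP mr (some w) (Astate rs cs w c) w = Astate rs cs w (c + 1) := by
  by_cases h1 : c = 1
  · subst h1
    have ha : Astate rs cs w 1 = (rs, cs ++ [w], []) := by simp [Astate]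
    rw [ha]
    simp only [stepP, if_pos rfl]
    rw [PySem.List.pop?_last]
    by_cases hcs : cs = [] <;>
      simp [hcs, hrFlushIf, Astate, List.replicate_succ]
  · have ha : Astate rs cs w c = (rs ++ hrFlushIf cs, [], List.replicate c w) := by
      simp [Astate, h1]
    rw [ha]
    simp only [stepP, if_pos rfl]
    have hpop : PySem.List.pop? ([] : List String) = none := rfl
    simp only [hpop]
    have ha' : Astate rs cs w (c + 1)
        = (rs ++ hrFlushIf cs, [], List.replicate (c + 1) w) := by
      simp [Astate]; omega
    rw [ha']
    simp [List.replicate_succ']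

theorem stepP_new (mr : Int) (rs cs : List String) (w x : String) (c : Nat)
    (hc : 1 ≤ c) (hx : x ≠ w) :
    stepP mr (some w) (Astate rs cs w c) x
      = ((flushA mr (Astate rs cs w c)).1, (flushA mr (Astate rs cs w c)).2 ++ [x], []) := by
  have hcond : ¬ (some w = some x) := by
    intro h
    exact hx (Option.some.inj h).symm
  by_cases h1 : c = 1
  · subst h1
    have ha : Astate rs cs w 1 = (rs, cs ++ [w], []) := by simp [Astate]
    rw [ha]
    simp [stepP, flushA, hcond]
  · have hrep : List.replicate c w ≠ [] := by
      simp only [ne_eq, List.replicate_eq_nil_iff]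
      omega
    have ha : Astate rs cs w c = (rs ++ hrFlushIf cs, [], List.replicate c w) := by
      simp [Astate, h1]
    rw [ha]
    simp only [stepP, if_neg hcond, flushA]
    simp [hrep]

theorem mid (mr : Int) (ws : List String) :
    ∀ (w : String) (c : Nat) (rs cs : List String), 1 ≤ c →
      finalB (flushA mr (prevFold mr (some w) (Astate rs cs w c) ws))
      = finalB ((hrGroupsAux w c ws).foldl (hrStepB mr) (rs, cs)) := by
  induction ws with
  | nil =>
    intro w c rs cs hc
    simp only [prevFold, hrGroupsAux, List.foldl_cons, List.foldl_nil]
    rw [flushA_Astate mr rs cs w c hc]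
  | cons x xs ih =>
    intro w c rs cs hc
    simp only [prevFold, hrGroupsAux]
    by_cases hx : x = w
    · subst hx
      rw [if_pos rfl, stepP_rep mr rs cs x c hc]
      exact ih x (c + 1) rs cs (by omega)
    · rw [if_neg hx, stepP_new mr rs cs w x c hc hx, flushA_Astate mr rs cs w c hc,
        List.foldl_cons]
      have hast : ((hrStepB mr (rs, cs) (w, c)).1, (hrStepB mr (rs, cs) (w, c)).2 ++ [x], ([] : List String))
          = Astate (hrStepB mr (rs, cs) (w, c)).1 (hrStepB mr (rs, cs) (w, c)).2 x 1 := by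
        simp [Astate]
      rw [hast]
      exact ih x 1 _ _ le_rfl

theorem top (mr : Int) (ws : List String) :
    finalB (flushA mr (prevFold mr none ([], [], []) ws))
    = finalB ((hrGroups ws).foldl (hrStepB mr) ([], [])) := by
  cases ws with
  | nil => rfl
  | cons w rest =>
    simp only [prevFold, hrGroups]
    have hs : stepP mr none ([], [], []) w = Astate [] [] w 1 := by
      simp [stepP, Astate]
    rw [hs]
    exact mid mr rest w 1 [] [] le_rfl

def prevOf (full : List String) : Nat → Option String
  | 0 => none
  | Nat.succ k' => full[k']?

theorem enum_eq (full : List String) (mr : Int) (suffix : List String) :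
    ∀ (k : Nat) (s : List String × List String × List String), full.drop k = suffix →
      (PySem.List.enumerate suffix (k : Int)).foldl (hrStep full mr) s
      = prevFold mr (prevOf full k) s suffix := by
  induction suffix with
  | nil => intro k s _; simp [PySem.List.enumerate, prevFold]
  | cons w ws ih =>
    intro k s hdrop
    rw [PySem.List.enumerate_cons, List.foldl_cons]
    have hdrop' : full.drop (k + 1) = ws := by
      rw [← List.tail_drop, hdrop]
      rfl
    have hk : full[k]? = some w := by
      have h0 : (full.drop k)[0]? = some w := by rw [hdrop]; rfl
      simpa using h0
    have hstep : hrStep full mr s ((k : Int), w) = stepP mr (prevOf full k) s w := by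
      apply if_congr _ rfl rfl
      cases k with
      | zero => simp [prevOf]
      | succ k' =>
        have h1 : ((((k' : Nat) + 1 : Nat) : Int) - 1) = (k' : Int) := by push_cast; ring
        simp only [prevOf, h1, PySem.List.pyGet?_natCast]
        constructor
        · rintro ⟨-, h⟩; exact h
        · intro h; exact ⟨by omega, h⟩
    have hcast : ((k : Int) + 1) = ((k + 1 : Nat) : Int) := by push_cast; ring
    have hprev : prevOf full (k + 1) = some w := by simpa [prevOf] using hk
    rw [hstep, hcast, ih (k + 1) _ hdrop', hprev]
    simp only [prevFold]

-- ===== VERDICT (by name: the statement is the Claim_ definition above) =====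
theorem handle_repetitions_spec : Claim_equal_handle_repetitions := by
  intro decoded_preds max_repeats detection_threshold _ _
  unfold Spec_handle_repetitions handle_repetitions handle_repetitions_alt
  by_cases hlen : ((PySem.Str.split₀ decoded_preds).length : Int) ≤ detection_threshold
  · simp [hlen]
  · rw [if_neg hlen, if_neg hlen]
    have h0 : ((0 : Nat) : Int) = 0 := rfl
    have he := enum_eq (PySem.Str.split₀ decoded_preds) max_repeats
      (PySem.Str.split₀ decoded_preds) 0 ([], [], []) rfl
    rw [h0] at he
    show finalB (flushA max_repeats _) = finalB _
    rw [he]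
    exact top max_repeats (PySem.Str.split₀ decoded_preds)
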